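-- pv_equiv track=rewrite | github.com/tchamna/nufi_gen_AI | scripts/export_training_corpus_with_sources.py | _build_source_index
-- ===== SOURCE A (Python) =====
-- def _build_source_index(sentence_sources: dict[str, list[dict]]) -> dict[str, int]:
--     seen_paths: list[str] = []
--     seen_set: set[str] = set()
--     for entries in sentence_sources.values():
--         for entry in entries:
--             path = str(entry["path"])
--             if path in seen_set:
--                 continue
--             seen_set.add(path)
--             seen_paths.append(path)
--     return {path: idx for idx, path in enumerate(sorted(seen_paths), start=1)}
-- ===== SOURCE B (Python) =====
-- def _build_source_index(sentence_sources: dict[str, list[dict]]) -> dict[str, int]: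
--     # Sort-then-scan: flatten ALL paths (duplicates included), sort the full
--     # list, then one forward pass dedups consecutive equals while numbering.
--     all_paths = sorted(
--         str(entry["path"])
--         for entries in sentence_sources.values()
--         for entry in entries
--     )
--     uniq: list[str] = []
--     for path in all_paths:
--         if not uniq or path != uniq[-1]:
--             uniq.append(path)
--     return {path: idx for idx, path in enumerate(uniq, start=1)}
-- ===== Notes on version B (the rewrite author's own statement) =====
-- stated objective: alternative
-- what changed: A dedups first via a membership set while scanning and then sorts the unique paths; B flattens all paths without deduplicating, sorts the full multiset once, and dedups consecutive equals in a single numbering pass (no membership structure at all).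
import Mathlib
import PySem

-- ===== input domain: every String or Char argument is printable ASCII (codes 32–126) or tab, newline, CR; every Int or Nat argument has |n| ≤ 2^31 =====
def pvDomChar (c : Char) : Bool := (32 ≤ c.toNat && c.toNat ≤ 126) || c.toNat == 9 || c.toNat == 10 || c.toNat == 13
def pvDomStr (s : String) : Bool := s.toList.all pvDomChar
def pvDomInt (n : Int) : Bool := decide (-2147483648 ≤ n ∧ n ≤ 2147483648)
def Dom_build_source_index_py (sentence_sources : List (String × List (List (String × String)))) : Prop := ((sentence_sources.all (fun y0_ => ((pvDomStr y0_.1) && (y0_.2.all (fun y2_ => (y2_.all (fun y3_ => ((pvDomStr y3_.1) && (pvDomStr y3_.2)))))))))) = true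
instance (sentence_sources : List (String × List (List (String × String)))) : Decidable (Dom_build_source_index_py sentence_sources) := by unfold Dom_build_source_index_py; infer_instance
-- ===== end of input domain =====

-- B swaps the two phases of A: it sorts the full multiset of paths first and dedups
-- consecutive equals while numbering, instead of A's dedup-with-a-set-then-sort; same cost class.

-- shared helper: str(entry["path"]) — the value is already a str; total via getD "",
-- the KeyError case (no "path" key) is excluded by Pre_build_source_index_py
def pvPath (entry : List (String × String)) : String :=
  ((PySem.Dict.mk entry).get? "path").getD ""

-- ===== PORT A =====
-- inner loop body: path lookup, membership test on seen_set, append to both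
def aStep (st : List String × PySem.Set String) (entry : List (String × String)) :
    List String × PySem.Set String :=
  let path := pvPath entry
  if PySem.Set.contains st.2 path then st
  else (st.1 ++ [path], PySem.Set.add st.2 path)

def build_source_index_py (sentence_sources : List (String × List (List (String × String)))) : List (String × Int) :=
  let st := sentence_sources.foldl (fun st pair => pair.2.foldl aStep st) ([], PySem.Set.empty)
  (PySem.List.enumerate (PySem.List.sorted st.1 (fun x => x) false) 1).map (fun p => (p.2, p.1))

-- ===== PORT B =====
-- loop body of B's consecutive-dedup pass: 'if not uniq or path != uniq[-1]: uniq.append(path)'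
def bStep (u : List String) (path : String) : List String :=
  if u.isEmpty || decide (some path ≠ PySem.List.pyGet? u (-1)) then u ++ [path] else u

def build_source_index_py_alt (sentence_sources : List (String × List (List (String × String)))) : List (String × Int) :=
  let all_paths := PySem.List.sorted
    (sentence_sources.flatMap (fun pair => pair.2.map pvPath)) (fun x => x) false
  let uniq := all_paths.foldl bStep []
  (PySem.List.enumerate uniq 1).map (fun p => (p.2, p.1))

-- ===== PRECONDITION & SPEC =====
-- Pre_ excludes exactly the inputs where some entry dict lacks the key "path": Python A raises KeyError there.
def Pre_build_source_index_py (sentence_sources : List (String × List (List (String × String)))) : Prop :=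
  ∀ pair ∈ sentence_sources, ∀ entry ∈ pair.2, ((PySem.Dict.mk entry).get? "path").isSome = true
instance (sentence_sources : List (String × List (List (String × String)))) : Decidable (Pre_build_source_index_py sentence_sources) := by unfold Pre_build_source_index_py; infer_instance

def pvWitness_build_source_index_py : (List (String × List (List (String × String)))) :=
  [("s1", [[("path", "b")], [("path", "a"), ("q", "z")], [("path", "b")]]), ("s2", [[("path", "a")]])]

def Spec_build_source_index_py (sentence_sources : List (String × List (List (String × String)))) (out : List (String × Int)) : Prop := out = build_source_index_py_alt sentence_sources
instance (sentence_sources : List (String × List (List (String × String)))) (out : List (String × Int)) : Decidable (Spec_build_source_index_py sentence_sources out) := by unfold Spec_build_source_index_py; infer_instance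

-- ===== CLAIM (what is proved, stated in full; the proofs are below) =====
def Claim_equal_build_source_index_py : Prop := ∀ (sentence_sources : List (String × List (List (String × String)))), Dom_build_source_index_py sentence_sources → Pre_build_source_index_py sentence_sources → Spec_build_source_index_py sentence_sources (build_source_index_py sentence_sources)

-- ===== LEMMAS AND PROOFS =====

-- the flattened multiset of all paths, in traversal order
def pvAll (ss : List (String × List (List (String × String)))) : List String :=
  ss.flatMap (fun pair => pair.2.map pvPath)

-- front-recursive specification of B's consecutive-dedup loop
def pvConsec (prev : Option String) : List String → List String
  | [] => []
  | x :: xs => if some x = prev then pvConsec prev xs else x :: pvConsec (some x) xs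

theorem pyGet_neg_one (u : List String) : PySem.List.pyGet? u (-1) = u.getLast? := by
  simp only [PySem.List.pyGet?, PySem.List.pyIdx?]
  rcases u with _ | ⟨x, xs⟩
  · simp
  · simp [List.getLast?_eq_getElem?]

theorem bStep_eq (u : List String) (p : String) :
    bStep u p = if some p = u.getLast? then u else u ++ [p] := by
  unfold bStep
  rw [pyGet_neg_one]
  rcases u with _ | ⟨x, xs⟩
  · simp
  · by_cases h : some p = (x :: xs).getLast? <;> simp [h]

theorem foldl_bStep (l u) : l.foldl bStep u = u ++ pvConsec u.getLast? l := by
  induction l generalizing u with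
  | nil => simp [pvConsec]
  | cons x xs ih =>
    rw [List.foldl_cons, bStep_eq]
    by_cases h : some x = u.getLast?
    · simp [h, pvConsec, ih]
    · rw [if_neg h, ih, pvConsec]
      rw [if_neg h]
      simp [List.getLast?_append]

theorem aStep_diag (s : PySem.Set String) (e : List (String × String)) :
    aStep (s, s) e = (PySem.Set.add s (pvPath e), PySem.Set.add s (pvPath e)) := by
  unfold aStep PySem.Set.add
  by_cases h : pvPath e ∈ s <;> simp [h]

theorem foldl_aStep_inner (entries : List (List (String × String))) (s : PySem.Set String) :
    entries.foldl aStep (s, s) =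
      ((entries.map pvPath).foldl PySem.Set.add s, (entries.map pvPath).foldl PySem.Set.add s) := by
  induction entries generalizing s with
  | nil => simp
  | cons e es ih => rw [List.foldl_cons, aStep_diag, ih]; simp

theorem foldl_aStep_outer (ss : List (String × List (List (String × String)))) (s : PySem.Set String) :
    ss.foldl (fun st pair => pair.2.foldl aStep st) (s, s) =
      ((pvAll ss).foldl PySem.Set.add s, (pvAll ss).foldl PySem.Set.add s) := by
  induction ss generalizing s with
  | nil => simp [pvAll]
  | cons p ps ih =>
    rw [List.foldl_cons, foldl_aStep_inner, ih]
    simp [pvAll, List.foldl_append]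

theorem consec_spec (l : List String) (hl : l.Pairwise (· ≤ ·)) (prev : Option String)
    (hp : ∀ a, prev = some a → ∀ x ∈ l, a ≤ x) :
    (pvConsec prev l).Pairwise (· < ·) ∧
      (∀ y, y ∈ pvConsec prev l ↔ (y ∈ l ∧ some y ≠ prev)) := by
  induction l generalizing prev with
  | nil => simp [pvConsec]
  | cons x xs ih =>
    rw [List.pairwise_cons] at hl
    obtain ⟨hx, hxs⟩ := hl
    by_cases h : some x = prev
    · have hp' : ∀ a, prev = some a → ∀ z ∈ xs, a ≤ z := fun a ha z hz => hp a ha z (List.mem_cons_of_mem _ hz)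
      obtain ⟨h1, h2⟩ := ih hxs prev hp'
      refine ⟨by simpa [pvConsec, h] using h1, ?_⟩
      intro y
      rw [pvConsec, if_pos h, h2 y]
      constructor
      · rintro ⟨hy, hne⟩; exact ⟨List.mem_cons_of_mem _ hy, hne⟩
      · rintro ⟨hy, hne⟩
        rcases List.mem_cons.mp hy with rfl | hy'
        · exact absurd h hne
        · exact ⟨hy', hne⟩
    · have hp' : ∀ a, some x = some a → ∀ z ∈ xs, a ≤ z := by
        rintro a ha z hz; cases Option.some.inj ha; exact hx z hz
      obtain ⟨h1, h2⟩ := ih hxs (some x) hp'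
      rw [pvConsec, if_neg h]
      constructor
      · rw [List.pairwise_cons]
        refine ⟨?_, h1⟩
        intro z hz
        obtain ⟨hz1, hz2⟩ := (h2 z).mp hz
        exact lt_of_le_of_ne (hx z hz1) (fun e => hz2 (by rw [e]))
      · intro y
        rw [List.mem_cons, h2 y]
        constructor
        · rintro (rfl | ⟨hy, hne⟩)
          · exact ⟨List.mem_cons_self, h⟩
          · refine ⟨List.mem_cons_of_mem _ hy, ?_⟩
            intro hyp
            rcases prev with _ | a
            · simp at hyp
            · have hy_eq : y = a := Option.some.inj hyp
              subst hy_eq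
              have hle1 : y ≤ x := hp y rfl x List.mem_cons_self
              have hle2 : x ≤ y := hx y hy
              exact hne (by rw [le_antisymm hle2 hle1])
        · rintro ⟨hy, hne⟩
          rcases List.mem_cons.mp hy with rfl | hy'
          · exact Or.inl rfl
          · by_cases hxy : y = x
            · exact Or.inl hxy
            · exact Or.inr ⟨hy', by simpa using hxy⟩

theorem core_eq (ss : List (String × List (List (String × String)))) :
    pvConsec none (PySem.List.sorted (pvAll ss) (fun x => x) false) =
      PySem.List.sorted (PySem.Set.ofList (pvAll ss)) (fun x => x) false := by
  have hs : (PySem.List.sorted (pvAll ss) (fun x => x) false).Pairwise (· ≤ ·) := by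
    simpa using PySem.List.sorted_pairwise (pvAll ss) (fun x => x)
  obtain ⟨h1, h2⟩ := consec_spec _ hs none (by simp)
  refine (PySem.List.sorted_eq_of_perm_of_pairwise_lt _ _ _ ?_ ?_).symm
  · rw [List.perm_ext_iff_of_nodup (List.Pairwise.imp ne_of_lt h1) (PySem.Set.nodup_ofList _)]
    intro y
    simp [h2 y, PySem.List.mem_sorted, PySem.Set.mem_ofList]
  · simpa using h1

-- ===== VERDICT (by name: the statement is the Claim_ definition above) =====
theorem build_source_index_py_spec : Claim_equal_build_source_index_py := by
  intro ss _ _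
  show build_source_index_py ss = build_source_index_py_alt ss
  simp only [build_source_index_py, build_source_index_py_alt]
  have hA : ss.foldl (fun st pair => pair.2.foldl aStep st) ([], PySem.Set.empty) =
      ((pvAll ss).foldl PySem.Set.add [], (pvAll ss).foldl PySem.Set.add []) :=
    foldl_aStep_outer ss PySem.Set.empty
  rw [hA]
  have hB : (PySem.List.sorted (pvAll ss) (fun x => x) false).foldl bStep [] =
      pvConsec none (PySem.List.sorted (pvAll ss) (fun x => x) false) := by
    simpa using foldl_bStep (PySem.List.sorted (pvAll ss) (fun x => x) false) []
  rw [show (ss.flatMap fun pair => pair.2.map pvPath) = pvAll ss from rfl, hB, core_eq ss,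
    ← PySem.Set.ofList_eq_foldl]
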